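-- pv_equiv track=rewrite | github.com/P34K1N/tddsp | 2/main.py | map_func
-- ===== SOURCE A (Python) =====
-- def map_func(words):
--     counts = {'a': {}, 'b': {}, 'c': {}, 'd': {}}
--     for word in words:
--         k = word[0]
--         if k in {'a', 'b', 'c', 'd'}:
--             if word in counts[k]:
--                 counts[k][word] += 1
--             else:
--                 counts[k][word] = 1
--     return counts
-- ===== SOURCE B (Python) =====
-- def map_func(words):
--     def bucket(c):
--         d = {}
--         for w in words:
--             if w[0] == c:
--                 d[w] = d.get(w, 0) + 1
--         return d
--     return {c: bucket(c) for c in 'abcd'}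
-- ===== Notes on version B (the rewrite author's own statement) =====
-- stated objective: alternative
-- what changed: A builds all four buckets in one pass over the words, dispatching each word into a nested dict-of-dicts; B makes one independent filtered counting pass per letter (four staged passes), assembling the result per bucket.
import Mathlib
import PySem

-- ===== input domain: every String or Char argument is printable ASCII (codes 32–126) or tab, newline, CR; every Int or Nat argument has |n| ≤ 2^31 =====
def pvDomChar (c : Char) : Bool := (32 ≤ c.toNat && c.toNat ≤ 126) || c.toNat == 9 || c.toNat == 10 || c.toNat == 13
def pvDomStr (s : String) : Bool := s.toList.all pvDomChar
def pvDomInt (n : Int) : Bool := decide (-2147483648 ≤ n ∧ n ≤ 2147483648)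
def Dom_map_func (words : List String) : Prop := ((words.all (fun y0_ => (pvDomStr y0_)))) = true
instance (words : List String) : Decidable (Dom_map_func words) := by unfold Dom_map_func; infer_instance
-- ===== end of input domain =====

-- B replaces A's single dispatching pass over a nested dict-of-dicts by four independent
-- per-letter filtered counting passes; alternative decomposition, not faster.

-- ===== PORT A =====
def map_func (words : List String) : List (String × List (String × Int)) :=
  let counts0 : PySem.Dict String (PySem.Dict String Int) :=
    PySem.Dict.ofList [("a", PySem.Dict.empty), ("b", PySem.Dict.empty),
                       ("c", PySem.Dict.empty), ("d", PySem.Dict.empty)]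
  let counts := words.foldl (fun counts word =>
    match PySem.Str.pyGet? word 0 with
    | none => counts          -- word[0] raises IndexError on "": excluded by Pre_
    | some ch =>
      if ch ∈ ['a', 'b', 'c', 'd'] then
        let k := String.singleton ch
        let inner := counts.getD k PySem.Dict.empty
        let inner' := if inner.contains word then inner.insert word (inner.getD word 0 + 1)
                      else inner.insert word 1
        counts.insert k inner'
      else counts) counts0
  counts.items.map (fun p => (p.1, p.2.items))

-- ===== PORT B =====
-- the inner helper 'bucket' of Source B: one filtered counting pass for the letter c
def mf_bucket (words : List String) (c : Char) : PySem.Dict String Int :=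
  words.foldl (fun d w =>
    match PySem.Str.pyGet? w 0 with
    | none => d               -- w[0] raises IndexError on "": excluded by Pre_
    | some ch => if ch == c then d.insert w (d.getD w 0 + 1) else d) PySem.Dict.empty

def map_func_alt (words : List String) : List (String × List (String × Int)) :=
  ['a', 'b', 'c', 'd'].map (fun c => (String.singleton c, (mf_bucket words c).items))

-- ===== PRECONDITION & SPEC =====
-- Pre_ excludes lists containing the empty string, on which A (word[0]) raises IndexError.
def Pre_map_func (words : List String) : Prop := ∀ w ∈ words, w ≠ ""
instance (words : List String) : Decidable (Pre_map_func words) := by unfold Pre_map_func; infer_instance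
def pvWitness_map_func : List String := ["apple", "bat", "dog", "apple", "egg", "ant"]

def Spec_map_func (words : List String) (out : List (String × List (String × Int))) : Prop := out = map_func_alt words
instance (words : List String) (out : List (String × List (String × Int))) : Decidable (Spec_map_func words out) := by unfold Spec_map_func; infer_instance

-- ===== CLAIM (what is proved, stated in full; the proofs are below) =====
def Claim_equal_map_func : Prop := ∀ (words : List String), Dom_map_func words → Pre_map_func words → Spec_map_func words (map_func words)

-- ===== LEMMAS AND PROOFS =====

def pvBuckets (da db dc dd : PySem.Dict String Int) : PySem.Dict String (PySem.Dict String Int) :=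
  PySem.Dict.ofList [("a", da), ("b", db), ("c", dc), ("d", dd)]
def pvFirst (c : Char) (w : String) : Bool := PySem.Str.pyGet? w 0 == some c
def pvStepA (counts : PySem.Dict String (PySem.Dict String Int)) (word : String) :
    PySem.Dict String (PySem.Dict String Int) :=
  match PySem.Str.pyGet? word 0 with
  | none => counts
  | some ch =>
    if ch ∈ ['a', 'b', 'c', 'd'] then
      let k := String.singleton ch
      let inner := counts.getD k PySem.Dict.empty
      let inner' := if inner.contains word then inner.insert word (inner.getD word 0 + 1)
                    else inner.insert word 1
      counts.insert k inner'
    else counts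
def pvCntA (d : PySem.Dict String Int) (l : List String) : PySem.Dict String Int :=
  l.foldl (fun d w => if d.contains w then d.insert w (d.getD w 0 + 1) else d.insert w 1) d

theorem pvFirst_get (w : String) (hw : w ≠ "") : ∃ ch, PySem.Str.pyGet? w 0 = some ch := by
  have hl : w.toList ≠ [] := by
    intro h
    apply hw
    have h2 := congrArg String.ofList h
    simpa using h2
  cases hc : w.toList with
  | nil => exact absurd hc hl
  | cons ch t =>
    refine ⟨ch, ?_⟩
    simp [hc, PySem.List.pyGet?, PySem.List.pyIdx?]

theorem pvLoopA (ws : List String) (h : ∀ w ∈ ws, w ≠ "") (da db dc dd : PySem.Dict String Int) :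
    ws.foldl pvStepA (pvBuckets da db dc dd) =
      pvBuckets (pvCntA da (ws.filter (pvFirst 'a'))) (pvCntA db (ws.filter (pvFirst 'b')))
                (pvCntA dc (ws.filter (pvFirst 'c'))) (pvCntA dd (ws.filter (pvFirst 'd'))) := by
  induction ws generalizing da db dc dd with
  | nil => rfl
  | cons w ws ih =>
    obtain ⟨ch, hget⟩ := pvFirst_get w (h w (List.mem_cons_self))
    have hh : ∀ w ∈ ws, w ≠ "" := fun x hx => h x (List.mem_cons_of_mem _ hx)
    have hget' : PySem.List.pyGet? w.toList 0 = some ch := by simpa using hget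
    have hfil : ∀ c : Char, pvFirst c w = (ch == c) := by
      intro c; simp [pvFirst, hget']
    by_cases ha : ch = 'a'
    · subst ha
      have hstep : pvStepA (pvBuckets da db dc dd) w =
          pvBuckets (if da.contains w then da.insert w (da.getD w 0 + 1) else da.insert w 1) db dc dd := by
        simp only [pvStepA]
        rw [show PySem.Str.pyGet? w 0 = some 'a' from hget]
        rfl
      rw [List.foldl_cons, hstep, ih hh]
      simp [hfil, pvCntA]
    · by_cases hb : ch = 'b'
      · subst hb
        have hstep : pvStepA (pvBuckets da db dc dd) w =
            pvBuckets da (if db.contains w then db.insert w (db.getD w 0 + 1) else db.insert w 1) dc dd := by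
          simp only [pvStepA]
          rw [show PySem.Str.pyGet? w 0 = some 'b' from hget]
          rfl
        rw [List.foldl_cons, hstep, ih hh]
        simp [hfil, pvCntA]
      · by_cases hc : ch = 'c'
        · subst hc
          have hstep : pvStepA (pvBuckets da db dc dd) w =
              pvBuckets da db (if dc.contains w then dc.insert w (dc.getD w 0 + 1) else dc.insert w 1) dd := by
            simp only [pvStepA]
            rw [show PySem.Str.pyGet? w 0 = some 'c' from hget]
            rfl
          rw [List.foldl_cons, hstep, ih hh]
          simp [hfil, pvCntA]
        · by_cases hd : ch = 'd'
          · subst hd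
            have hstep : pvStepA (pvBuckets da db dc dd) w =
                pvBuckets da db dc (if dd.contains w then dd.insert w (dd.getD w 0 + 1) else dd.insert w 1) := by
              simp only [pvStepA]
              rw [show PySem.Str.pyGet? w 0 = some 'd' from hget]
              rfl
            rw [List.foldl_cons, hstep, ih hh]
            simp [hfil, pvCntA]
          · have hstep : pvStepA (pvBuckets da db dc dd) w = pvBuckets da db dc dd := by
              simp only [pvStepA]
              rw [hget]
              simp [ha, hb, hc, hd]
            rw [List.foldl_cons, hstep, ih hh]
            simp [hfil, ha, hb, hc, hd]

-- A's contains-branching counting step is the plain getD+1 step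
theorem pvCntA_eq_simple (l : List String) (d : PySem.Dict String Int) :
    pvCntA d l = l.foldl (fun d w => d.insert w (d.getD w 0 + 1)) d := by
  unfold pvCntA
  congr 1
  funext d w
  by_cases hw : d.contains w
  · simp [hw]
  · simp only [hw, Bool.false_eq_true, if_false]
    rw [PySem.Dict.getD_of_not_contains d 0 (by simpa using hw)]
    norm_num

-- B's one filtered counting pass equals counting over the filtered list
theorem mf_bucket_gen (ws : List String) (c : Char) (d : PySem.Dict String Int) :
    ws.foldl (fun d w =>
      match PySem.Str.pyGet? w 0 with
      | none => d
      | some ch => if ch == c then d.insert w (d.getD w 0 + 1) else d) d =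
    (ws.filter (pvFirst c)).foldl (fun d w => d.insert w (d.getD w 0 + 1)) d := by
  induction ws generalizing d with
  | nil => rfl
  | cons w ws ih =>
    rw [List.foldl_cons, List.filter_cons]
    cases hget : PySem.Str.pyGet? w 0 with
    | none =>
      have hget2 : PySem.List.pyGet? w.toList 0 = none := by simpa using hget
      have : pvFirst c w = false := by simp [pvFirst, hget2]
      rw [this]
      simpa using ih d
    | some ch =>
      have hget2 : PySem.List.pyGet? w.toList 0 = some ch := by simpa using hget
      have hfil : pvFirst c w = (ch == c) := by simp [pvFirst, hget2]
      by_cases hc : ch = c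
      · subst hc
        rw [hfil]
        simpa using ih (d.insert w (d.getD w 0 + 1))
      · rw [hfil]
        simp only [beq_eq_false_iff_ne.mpr hc, Bool.false_eq_true, if_false]
        exact ih d

theorem mf_bucket_eq (ws : List String) (c : Char) :
    mf_bucket ws c = pvCntA PySem.Dict.empty (ws.filter (pvFirst c)) := by
  rw [mf_bucket, mf_bucket_gen, pvCntA_eq_simple]

-- ===== VERDICT (by name: the statement is the Claim_ definition above) =====
theorem map_func_spec : Claim_equal_map_func := by
  unfold Claim_equal_map_func
  intro words _ hpre
  unfold Spec_map_func map_func map_func_alt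
  show ((words.foldl pvStepA
      (pvBuckets PySem.Dict.empty PySem.Dict.empty PySem.Dict.empty PySem.Dict.empty)).items.map
        (fun p => (p.1, p.2.items)))
    = ['a', 'b', 'c', 'd'].map (fun c => (String.singleton c, (mf_bucket words c).items))
  rw [pvLoopA words hpre]
  simp only [List.map_cons, List.map_nil, mf_bucket_eq]
  rfl
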